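-- pv_equiv track=rewrite | github.com/leeeeeyeon/algorithm | 구현/pro138476.py | solution
-- ===== SOURCE A (Python) =====
-- from collections import Counter
--
-- def solution(k, tangerine):
--     answer = 0
--
--     counter = Counter(tangerine)
--     keys = sorted(counter.keys(), key=lambda x: -counter[x])
--
--     for key in keys:
--         if k - counter[key] <= 0:
--             answer += 1
--             break
--         else:
--             k -= counter[key]
--             answer += 1
--
--     return answer
-- ===== SOURCE B (Python) =====
-- from collections import Counter
--
-- def solution(k, tangerine):
--     if not tangerine:
--         return 0
--     counter = Counter(tangerine)
--     freq = Counter(counter.values())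
--     maxc = max(counter.values())
--     answer = 0
--     for c in range(maxc, 0, -1):
--         for _ in range(freq[c]):
--             answer += 1
--             if k - c <= 0:
--                 return answer
--             k -= c
--     return answer
-- ===== Notes on version B (the rewrite author's own statement) =====
-- stated objective: faster
-- what changed: B replaces A's comparison sort of the distinct sizes (sorted by descending count) with a count-of-counts table (Counter of the counter's values) scanned from the largest count down to 1, peeling fruit counts in the same descending order without any comparison sort. (measured ~1.6x faster at the largest size: no comparison sort, only counting-table scans)
import Mathlib
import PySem

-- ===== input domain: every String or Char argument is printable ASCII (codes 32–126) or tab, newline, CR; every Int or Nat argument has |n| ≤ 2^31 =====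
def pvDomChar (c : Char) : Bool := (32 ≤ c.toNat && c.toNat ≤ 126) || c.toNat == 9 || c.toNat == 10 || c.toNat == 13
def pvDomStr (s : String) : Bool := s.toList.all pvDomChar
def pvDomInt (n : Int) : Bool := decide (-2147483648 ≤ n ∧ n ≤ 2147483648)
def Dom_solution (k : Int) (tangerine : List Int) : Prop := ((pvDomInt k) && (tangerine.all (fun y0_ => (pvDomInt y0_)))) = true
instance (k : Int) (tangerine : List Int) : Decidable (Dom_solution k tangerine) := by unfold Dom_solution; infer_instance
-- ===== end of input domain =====

-- B replaces A's comparison sort of the distinct sizes by a count-of-counts table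
-- scanned from the largest count downwards (objective: alternative algorithm, no comparison sort).

-- ===== PORT A =====
-- the 'for key in keys' loop with its break, carrying (k, answer)
def solutionLoopA (counter : PySem.Dict Int Int) (keys : List Int) (k answer : Int) : Int :=
  match keys with
  | [] => answer
  | key :: rest =>
    if k - counter.getD key 0 ≤ 0 then answer + 1
    else solutionLoopA counter rest (k - counter.getD key 0) (answer + 1)

def solution (k : Int) (tangerine : List Int) : Int :=
  let counter := PySem.Dict.counter tangerine
  let keys := PySem.List.sorted counter.keys (fun x => -(counter.getD x 0))
  solutionLoopA counter keys k 0

-- ===== PORT B =====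
-- the inner 'for _ in range(freq[c])' loop: .inl = early return, .inr = updated (k, answer)
def solutionAltInner (m : Nat) (c k answer : Int) : Sum Int (Int × Int) :=
  match m with
  | 0 => .inr (k, answer)
  | m + 1 =>
    if k - c ≤ 0 then .inl (answer + 1)
    else solutionAltInner m c (k - c) (answer + 1)

-- the outer 'for c in range(maxc, 0, -1)' loop
def solutionAltOuter (freq : PySem.Dict Int Int) (cs : List Int) (k answer : Int) : Int :=
  match cs with
  | [] => answer
  | c :: rest =>
    match solutionAltInner (freq.getD c 0).toNat c k answer with
    | .inl ans => ans
    | .inr p => solutionAltOuter freq rest p.1 p.2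

def solution_alt (k : Int) (tangerine : List Int) : Int :=
  match tangerine with
  | [] => 0
  | _ :: _ =>
    let counter := PySem.Dict.counter tangerine
    let freq := PySem.Dict.counter counter.values
    match PySem.List.max? counter.values (fun x => x) with
    | none => 0  -- unreachable: counter.values is nonempty
    | some maxc => solutionAltOuter freq (PySem.List.pyRange maxc 0 (-1)) k 0

-- ===== PRECONDITION & SPEC =====
def Spec_solution (k : Int) (tangerine : List Int) (out : Int) : Prop := out = solution_alt k tangerine
instance (k : Int) (tangerine : List Int) (out : Int) : Decidable (Spec_solution k tangerine out) := by unfold Spec_solution; infer_instance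

-- ===== CLAIM (what is proved, stated in full; the proofs are below) =====
def Claim_equal_solution : Prop := ∀ (k : Int) (tangerine : List Int), Dom_solution k tangerine → Spec_solution k tangerine (solution k tangerine)

-- ===== LEMMAS AND PROOFS =====

-- the common greedy "peel counts in this order" loop both ports reduce to
def pvPeel (cs : List Int) (k answer : Int) : Int :=
  match cs with
  | [] => answer
  | c :: rest => if k - c ≤ 0 then answer + 1 else pvPeel rest (k - c) (answer + 1)

theorem pvLoopA_eq (counter : PySem.Dict Int Int) (keys : List Int) :
    ∀ k answer, solutionLoopA counter keys k answer
      = pvPeel (keys.map (fun x => counter.getD x 0)) k answer := by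
  induction keys with
  | nil => intro k a; rfl
  | cons key rest ih =>
    intro k a
    simp only [solutionLoopA, List.map_cons, pvPeel]
    split
    · rfl
    · exact ih _ _

theorem pvInner_eq (m : Nat) : ∀ (c k a : Int) (rest : List Int),
    (match solutionAltInner m c k a with
     | .inl x => x
     | .inr p => pvPeel rest p.1 p.2)
    = pvPeel (List.replicate m c ++ rest) k a := by
  induction m with
  | zero => intro c k a rest; rfl
  | succ m ih =>
    intro c k a rest
    simp only [solutionAltInner, List.replicate_succ, List.cons_append, pvPeel]
    by_cases hkc : k - c ≤ 0
    · simp [hkc]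
    · simp only [if_neg hkc]
      exact ih _ _ _ _

theorem pvLoopB_eq (freq : PySem.Dict Int Int) (cs : List Int) :
    ∀ k a, solutionAltOuter freq cs k a
      = pvPeel (cs.flatMap (fun c => List.replicate (freq.getD c 0).toNat c)) k a := by
  induction cs with
  | nil => intro k a; rfl
  | cons c rest ih =>
    intro k a
    rw [List.flatMap_cons, ← pvInner_eq]
    simp only [solutionAltOuter]
    split
    · rfl
    · rw [ih]

theorem pvRange_closed (m : Int) : PySem.List.pyRange m 0 (-1) =
    (List.range m.toNat).map (fun k : Nat => m - (k:Int)) := by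
  simp only [PySem.List.pyRange]
  norm_num
  have h1 : (if 0 < m then m.toNat else 0) = m.toNat := by split <;> omega
  rw [h1]
  apply List.map_congr_left; intro k _
  omega

theorem pvRange_mem (m x : Int) : x ∈ PySem.List.pyRange m 0 (-1) ↔ 1 ≤ x ∧ x ≤ m := by
  rw [pvRange_closed]
  simp only [List.mem_map, List.mem_range]
  constructor
  · rintro ⟨k, hk, rfl⟩; omega
  · rintro ⟨h1, h2⟩
    exact ⟨(m - x).toNat, by omega, by omega⟩

theorem pvRange_gt (m : Int) : List.Pairwise (· > ·) (PySem.List.pyRange m 0 (-1)) := by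
  rw [pvRange_closed]
  apply List.pairwise_map.mpr
  exact (List.pairwise_lt_range).imp (by intro a b hab; omega)

theorem pvFlat_pairwise (cs : List Int) (g : Int → Nat) (h : List.Pairwise (· > ·) cs) :
    List.Pairwise (fun a b => b ≤ a) (cs.flatMap (fun c => List.replicate (g c) c)) := by
  induction cs with
  | nil => simp
  | cons c rest ih =>
    rw [List.flatMap_cons, List.pairwise_append]
    refine ⟨List.pairwise_replicate.mpr (Or.inr le_rfl), ih h.tail, ?_⟩
    intro a ha b hb
    obtain rfl := List.eq_of_mem_replicate ha
    obtain ⟨c', hc', hb'⟩ := List.mem_flatMap.mp hb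
    obtain rfl := List.eq_of_mem_replicate hb'
    exact le_of_lt (List.rel_of_pairwise_cons h hc')

theorem pvFlat_count (cs : List Int) (g : Int → Nat) (h : cs.Nodup) (v : Int) :
    List.count v (cs.flatMap (fun c => List.replicate (g c) c))
      = if v ∈ cs then g v else 0 := by
  induction cs with
  | nil => simp
  | cons c rest ih =>
    rw [List.flatMap_cons, List.count_append, List.count_replicate, ih h.of_cons]
    by_cases hv : v = c
    · subst hv
      simp [(List.nodup_cons.mp h).1]
    · simp [hv, Ne.symm hv, List.mem_cons]

-- counter.values is the list of counts of the distinct elements of tangerine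
theorem pvValues_eq (tangerine : List Int) :
    (PySem.Dict.counter tangerine).values
      = (PySem.Set.ofList tangerine).map (fun x => (tangerine.count x : Int)) := by
  have : (PySem.Dict.counter tangerine).values
      = (PySem.Dict.counter tangerine).items.map (·.2) := rfl
  rw [this, PySem.Dict.items_counter, List.map_map]
  rfl

theorem pvValues_pos (tangerine : List Int) (v : Int)
    (hv : v ∈ (PySem.Dict.counter tangerine).values) : 1 ≤ v := by
  rw [pvValues_eq] at hv
  obtain ⟨x, hx, rfl⟩ := List.mem_map.mp hv
  have : x ∈ tangerine := (PySem.Set.mem_ofList tangerine x).mp hx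
  have := List.count_pos_iff.mpr this
  omega

-- the two count sequences are the same list
theorem pvLists_eq (tangerine : List Int) (maxc : Int)
    (hmax : PySem.List.max? (PySem.Dict.counter tangerine).values (fun x => x) = some maxc) :
    (PySem.List.sorted (PySem.Dict.counter tangerine).keys
        (fun x => -((PySem.Dict.counter tangerine).getD x 0))).map
      (fun x => (PySem.Dict.counter tangerine).getD x 0)
    = (PySem.List.pyRange maxc 0 (-1)).flatMap
        (fun c => List.replicate ((PySem.Dict.counter tangerine).values.count c) c) := by
  set d := PySem.Dict.counter tangerine with hd
  set f : Int → Int := fun x => d.getD x 0 with hf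
  -- both sides are permutations of d.values
  have hperm1 : ((PySem.List.sorted d.keys (fun x => -(f x))).map f).Perm d.values := by
    have h1 : ((PySem.List.sorted d.keys (fun x => -(f x))).map f).Perm (d.keys.map f) :=
      (PySem.List.sorted_perm d.keys (fun x => -(f x)) false).map f
    rw [← PySem.Dict.values_eq_map_keys d (by rw [hd]; exact PySem.Dict.nodup_keys_counter tangerine) 0] at h1
    exact h1
  have hnodup : (PySem.List.pyRange maxc 0 (-1)).Nodup :=
    (pvRange_gt maxc).imp (fun h => ne_of_gt h)
  have hperm2 : ((PySem.List.pyRange maxc 0 (-1)).flatMap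
      (fun c => List.replicate (d.values.count c) c)).Perm d.values := by
    rw [List.perm_iff_count]
    intro v
    rw [pvFlat_count _ _ hnodup]
    by_cases hv : v ∈ PySem.List.pyRange maxc 0 (-1)
    · simp [hv]
    · rw [if_neg hv]
      rw [pvRange_mem] at hv
      symm
      rw [List.count_eq_zero]
      intro hmem
      exact hv ⟨pvValues_pos tangerine v hmem, PySem.List.max?_isMax hmax v hmem⟩
  -- both sides are sorted non-increasingly
  have hP1 : List.Pairwise (fun a b => b ≤ a)
      ((PySem.List.sorted d.keys (fun x => -(f x))).map f) := by
    rw [List.pairwise_map, List.pairwise_iff_getElem]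
    intro i j hi hj hij
    have := PySem.List.key_sorted_getElem_mono d.keys (fun x => -(f x))
      (le_of_lt hij) hj
    simpa using this
  have hP2 : List.Pairwise (fun a b => b ≤ a)
      ((PySem.List.pyRange maxc 0 (-1)).flatMap
        (fun c => List.replicate (d.values.count c) c)) :=
    pvFlat_pairwise _ _ (pvRange_gt maxc)
  exact List.Perm.eq_of_pairwise
    (fun a b _ _ h1 h2 => le_antisymm h2 h1) hP1 hP2
    (hperm1.trans hperm2.symm)

-- ===== VERDICT (by name: the statement is the Claim_ definition above) =====
theorem solution_spec : Claim_equal_solution := by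
  intro k tangerine _
  unfold Spec_solution
  cases tangerine with
  | nil =>
    rfl
  | cons t0 ts =>
    cases hmax : PySem.List.max? (PySem.Dict.counter (t0 :: ts)).values (fun x => x) with
    | none =>
      exfalso
      have hnil := (PySem.List.max?_eq_none_iff _ _).mp hmax
      rw [pvValues_eq, List.map_eq_nil_iff] at hnil
      have h0 : t0 ∈ PySem.Set.ofList (t0 :: ts) :=
        (PySem.Set.mem_ofList _ t0).mpr (List.mem_cons_self)
      rw [hnil] at h0
      simp at h0
    | some maxc =>
      simp only [solution, solution_alt, hmax]
      rw [pvLoopA_eq, pvLoopB_eq]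
      have hfun : ∀ c : Int,
          ((PySem.Dict.counter (PySem.Dict.counter (t0 :: ts)).values).getD c 0).toNat
          = (PySem.Dict.counter (t0 :: ts)).values.count c := by
        intro c
        rw [PySem.Dict.getD_counter]
        exact Int.toNat_natCast _
      rw [List.flatMap_congr (fun c _ => by rw [hfun c])]
      rw [pvLists_eq (t0 :: ts) maxc hmax]
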